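-- pv_equiv track=rewrite | github.com/scottrsmith/RobotClassify | mlLib/cleanData.py | equationPrep
-- ===== SOURCE A (Python) =====
-- def equationPrep(df, name, value, indicator):
--
--     def fixSpacing(s):
--         opChar = ['&', '+', '-', '/', '*',
--                   '(', ')', '=', '>', '<', '|', '~', '^']
--         str = ''
--         lastWasChar = False
--         lastWasOp = False
--         for x in s:
--             if x in opChar:
--                 lastWasOp = True
--                 if lastWasChar:
--                     str += ' '
--                     lastWasChar = False
--             else:
--                 lastWasChar = True
--                 if lastWasOp:
--                     str += ' '
--                     lastWasOp = False
--
--             str += x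
--         return str
--
--     fixedSpaces = fixSpacing(value)
--     words = fixedSpaces.split(' ')
--
--     eq = ''
--     for w in words:
--         if w in df:
--             eq += "df['{}'] ".format(w)
--         elif indicator and w.lower() == 'and':
--             eq += ' & '
--         elif indicator and w.lower() == 'or':
--             eq += ' | '
--         else:
--             eq += w + ' '
--
--     if indicator:
--         return "df['{}'] = ({}).astype(int)".format(name, eq)
--     else:
--         return "df['{}'] = {}".format(name, eq)
-- ===== SOURCE B (Python) =====
-- OP_CHARS = set('&+-/*()=><|~^')
--
--
-- def equationPrep(df, name, value, indicator):
--     # pairwise formulation: emit each char, plus one space at every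
--     # boundary where the operator-class of adjacent chars differs
--     def fixSpacing(s):
--         if not s:
--             return ''
--         return ''.join(a + (' ' if (a in OP_CHARS) != (b in OP_CHARS) else '')
--                        for a, b in zip(s, s[1:])) + s[-1]
--
--     def render(w):
--         if w in df:
--             return "df['{}'] ".format(w)
--         if indicator and w.lower() == 'and':
--             return ' & '
--         if indicator and w.lower() == 'or':
--             return ' | '
--         return w + ' '
--
--     eq = ''.join(render(w) for w in fixSpacing(value).split(' '))
--     if indicator:
--         return "df['{}'] = ({}).astype(int)".format(name, eq)
--     return "df['{}'] = {}".format(name, eq)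
-- ===== Notes on version B (the rewrite author's own statement) =====
-- stated objective: simpler
-- what changed: fixSpacing's two-flag (lastWasOp/lastWasChar) state machine is replaced by a stateless pairwise zip over adjacent characters that emits a space at every operator-class boundary, and the token loop's string accumulation is replaced by a join over a render helper mapped across the words.
import Mathlib
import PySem

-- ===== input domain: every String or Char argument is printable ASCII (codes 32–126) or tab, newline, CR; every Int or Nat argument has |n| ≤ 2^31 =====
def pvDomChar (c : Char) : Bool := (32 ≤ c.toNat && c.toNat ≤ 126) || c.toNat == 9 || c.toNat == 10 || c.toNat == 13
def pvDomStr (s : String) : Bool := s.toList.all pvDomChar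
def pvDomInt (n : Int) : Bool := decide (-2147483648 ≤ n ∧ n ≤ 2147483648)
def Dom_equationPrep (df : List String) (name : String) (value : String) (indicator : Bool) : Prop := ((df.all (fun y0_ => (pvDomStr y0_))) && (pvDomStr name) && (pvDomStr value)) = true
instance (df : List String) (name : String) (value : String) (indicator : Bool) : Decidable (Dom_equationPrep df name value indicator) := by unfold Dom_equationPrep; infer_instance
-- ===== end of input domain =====

-- B replaces A's two-flag fixSpacing state machine by a stateless pairwise (zip) boundary
-- insertion and builds eq by join-of-map instead of an accumulating loop (objective: simpler).

-- ===== PORT A =====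
-- fixSpacing's loop: state (str, lastWasChar, lastWasOp), one step per character
def pvStepA (st : List Char × Bool × Bool) (x : Char) : List Char × Bool × Bool :=
  match st with
  | (str, lastWasChar, lastWasOp) =>
    if ['&', '+', '-', '/', '*', '(', ')', '=', '>', '<', '|', '~', '^'].contains x then
      if lastWasChar then (str ++ [' '] ++ [x], false, true)
      else (str ++ [x], lastWasChar, true)
    else
      if lastWasOp then (str ++ [' '] ++ [x], true, false)
      else (str ++ [x], true, lastWasOp)

def pvFixA (s : List Char) : List Char :=
  (s.foldl pvStepA ([], false, false)).1

def equationPrep (df : List String) (name : String) (value : String) (indicator : Bool) : String :=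
  let words := PySem.Chars.splitOn (pvFixA value.toList) " ".toList
  let eq := words.foldl (fun eq w =>
    if df.contains (String.mk w) then
      eq ++ ("df['".toList ++ w ++ "'] ".toList)
    else if indicator && (PySem.Chars.lower w == "and".toList) then
      eq ++ " & ".toList
    else if indicator && (PySem.Chars.lower w == "or".toList) then
      eq ++ " | ".toList
    else
      eq ++ (w ++ " ".toList)) []
  if indicator then
    String.mk ("df['".toList ++ name.toList ++ "'] = (".toList ++ eq ++ ").astype(int)".toList)
  else
    String.mk ("df['".toList ++ name.toList ++ "'] = ".toList ++ eq)

-- ===== PORT B =====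
def pvIsOp (c : Char) : Bool := "&+-/*()=><|~^".toList.contains c

-- B's fixSpacing: each char, plus a space at every boundary where the operator-class flips
def pvFixB (s : List Char) : List Char :=
  if s.isEmpty then []
  else
    ((s.zip s.tail).flatMap (fun p => if pvIsOp p.1 != pvIsOp p.2 then [p.1, ' '] else [p.1]))
      ++ (s.getLast?.elim [] (fun c => [c]))

def pvRender (df : List String) (indicator : Bool) (w : List Char) : List Char :=
  if df.contains (String.mk w) then "df['".toList ++ w ++ "'] ".toList
  else if indicator && (PySem.Chars.lower w == "and".toList) then " & ".toList
  else if indicator && (PySem.Chars.lower w == "or".toList) then " | ".toList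
  else w ++ " ".toList

def equationPrep_alt (df : List String) (name : String) (value : String) (indicator : Bool) : String :=
  let eq := ((PySem.Chars.splitOn (pvFixB value.toList) " ".toList).map (pvRender df indicator)).flatten
  if indicator then
    String.mk ("df['".toList ++ name.toList ++ "'] = (".toList ++ eq ++ ").astype(int)".toList)
  else
    String.mk ("df['".toList ++ name.toList ++ "'] = ".toList ++ eq)

-- ===== PRECONDITION & SPEC =====
def Spec_equationPrep (df : List String) (name : String) (value : String) (indicator : Bool) (out : String) : Prop := out = equationPrep_alt df name value indicator
instance (df : List String) (name : String) (value : String) (indicator : Bool) (out : String) : Decidable (Spec_equationPrep df name value indicator out) := by unfold Spec_equationPrep; infer_instance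

-- ===== CLAIM (what is proved, stated in full; the proofs are below) =====
def Claim_equal_equationPrep : Prop := ∀ (df : List String) (name : String) (value : String) (indicator : Bool), Dom_equationPrep df name value indicator → Spec_equationPrep df name value indicator (equationPrep df name value indicator)

-- ===== LEMMAS AND PROOFS =====

-- common description of fixSpacing's output after the first character:
-- given the class b of the previous character, emit a space at every class flip
def pvG (b : Bool) : List Char → List Char
  | [] => []
  | x :: t => (if b != pvIsOp x then [' '] else []) ++ x :: pvG (pvIsOp x) t

theorem pvOp_eq (x : Char) :
    (['&', '+', '-', '/', '*', '(', ')', '=', '>', '<', '|', '~', '^'].contains x) = pvIsOp x := by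
  simp [pvIsOp]

theorem pvStepA_state (acc : List Char) (b : Bool) (x : Char) :
    pvStepA (acc, !b, b) x =
      (acc ++ (if b != pvIsOp x then [' '] else []) ++ [x], !(pvIsOp x), pvIsOp x) := by
  simp only [pvStepA, pvOp_eq]
  cases h : pvIsOp x <;> cases b <;> simp

theorem pvFoldA_go (cs : List Char) : ∀ (b : Bool) (acc : List Char),
    (cs.foldl pvStepA (acc, !b, b)).1 = acc ++ pvG b cs := by
  induction cs with
  | nil => intro b acc; simp [pvG]
  | cons x t ih =>
    intro b acc
    simp only [List.foldl_cons, pvStepA_state, pvG, ih]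
    simp

theorem pvFixA_eq_G (cs : List Char) :
    pvFixA cs = (match cs with | [] => [] | x :: t => x :: pvG (pvIsOp x) t) := by
  cases cs with
  | nil => rfl
  | cons x t =>
    have h1 : pvStepA ([], false, false) x = ([x], !(pvIsOp x), pvIsOp x) := by
      simp only [pvStepA, pvOp_eq]
      cases h : pvIsOp x <;> simp
    simp only [pvFixA, List.foldl_cons, h1, pvFoldA_go]
    simp

theorem pvFixB_cons (x : Char) (t : List Char) :
    pvFixB (x :: t) = x :: pvG (pvIsOp x) t := by
  induction t generalizing x with
  | nil => simp [pvFixB, pvG]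
  | cons y t' ih =>
    have h : pvFixB (x :: y :: t') =
        (if pvIsOp x != pvIsOp y then [x, ' '] else [x]) ++ pvFixB (y :: t') := by
      simp [pvFixB, List.zip]
    rw [h, ih y]
    cases hxy : (pvIsOp x != pvIsOp y) <;> simp [pvG, hxy]

theorem pvFix_eq (cs : List Char) : pvFixA cs = pvFixB cs := by
  cases cs with
  | nil => rfl
  | cons x t => rw [pvFixA_eq_G, pvFixB_cons]

-- ===== VERDICT (by name: the statement is the Claim_ definition above) =====
theorem equationPrep_spec : Claim_equal_equationPrep := by
  intro df name value indicator _
  show equationPrep df name value indicator = equationPrep_alt df name value indicator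
  unfold equationPrep equationPrep_alt
  have hstep : (fun (eq w : List Char) =>
      if df.contains (String.mk w) then eq ++ ("df['".toList ++ w ++ "'] ".toList)
      else if indicator && (PySem.Chars.lower w == "and".toList) then eq ++ " & ".toList
      else if indicator && (PySem.Chars.lower w == "or".toList) then eq ++ " | ".toList
      else eq ++ (w ++ " ".toList)) = (fun eq w => eq ++ pvRender df indicator w) := by
    funext eq w
    simp only [pvRender]
    split_ifs <;> rfl
  simp only [pvFix_eq, hstep, PySem.List.foldl_append_eq_flatMap, List.nil_append,
    List.flatMap_def]
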